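-- pv_equiv track=rewrite | github.com/LP-RG/subxpat | post_processing/analyze.py | _pareto_front_with_et_coverage
-- ===== SOURCE A (Python) =====
-- def _pareto_front_with_et_coverage(points):
--     # Sort the points first by ET and then by area
--     points = sorted(points, key=lambda x: (x[1], x[0]))
--
--     # Initialize the Pareto front list and a dictionary to track the minimum area for each ET
--     pareto = []
--     min_area_for_et = {}
--
--     for point in points:
--         area, et = point
--
--         # If this is the first point with this ET, add it to the Pareto front
--         if et not in min_area_for_et:
--             pareto.append(point)
--             min_area_for_et[et] = area
--         else:
--             # If the area is better than the stored one, update the Pareto front for this ET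
--             if area < min_area_for_et[et]:
--                 # Remove the old point with this ET from the Pareto front
--                 pareto = [p for p in pareto if p[1] != et]
--                 # Add the new point
--                 pareto.append(point)
--                 min_area_for_et[et] = area
--
--     # Sort the final Pareto front by area for readability (optional)
--     pareto = sorted(pareto, key=lambda x: (x[1], x[0]))
--
--     return pareto
-- ===== SOURCE B (Python) =====
-- def _pareto_front_with_et_coverage(points):
--     # For each distinct ET (ascending), pair it with the minimum area found for it.
--     ets = sorted({et for _, et in points})
--     return [(min((area for area, e in points if e == et), default=0), et) for et in ets]
-- ===== Notes on version B (the rewrite author's own statement) =====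
-- stated objective: simpler
-- what changed: Replaces the sort-then-scan with an incrementally maintained dict and removal-rebuild of the pareto list by a direct two-line comprehension: take the sorted distinct ET values and pair each with the minimum area among its points.
import Mathlib
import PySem

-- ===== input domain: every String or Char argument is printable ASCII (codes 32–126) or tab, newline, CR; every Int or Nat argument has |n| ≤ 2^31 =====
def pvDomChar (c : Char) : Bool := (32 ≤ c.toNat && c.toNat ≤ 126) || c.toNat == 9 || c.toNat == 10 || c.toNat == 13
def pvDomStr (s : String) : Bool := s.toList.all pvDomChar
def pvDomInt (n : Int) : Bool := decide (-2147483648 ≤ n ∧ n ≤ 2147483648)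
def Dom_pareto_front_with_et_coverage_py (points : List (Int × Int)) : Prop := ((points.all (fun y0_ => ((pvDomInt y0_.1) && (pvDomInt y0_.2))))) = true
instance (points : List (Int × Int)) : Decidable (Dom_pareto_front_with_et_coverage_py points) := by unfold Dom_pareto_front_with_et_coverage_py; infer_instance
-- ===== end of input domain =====

-- B replaces A's sort-then-scan with dict maintenance and pareto-list rebuilding by a direct
-- comprehension: the sorted distinct ET values, each paired with the minimum area among its points (objective: simpler).

-- ===== PORT A =====
-- loop body of A's 'for point in points' (state: the pareto list and the min_area_for_et dict)
def paretoStep (st : List (Int × Int) × PySem.Dict Int Int) (point : Int × Int) :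
    List (Int × Int) × PySem.Dict Int Int :=
  let pareto := st.1
  let d := st.2
  let area := point.1
  let et := point.2
  if d.contains et = false then
    (pareto ++ [point], d.insert et area)
  else if area < d.getD et 0 then
    ((pareto.filter (fun p => decide (p.2 ≠ et))) ++ [point], d.insert et area)
  else
    (pareto, d)

def pareto_front_with_et_coverage_py (points : List (Int × Int)) : List (Int × Int) :=
  let pts := PySem.List.sorted2 points (fun x => x.2) (fun x => x.1)
  let st := pts.foldl paretoStep ([], PySem.Dict.empty)
  PySem.List.sorted2 st.1 (fun x => x.2) (fun x => x.1)

-- ===== PORT B =====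
-- min((area for area, e in points if e == et), default=0); the default is never used (et occurs in points)
def etMinArea (points : List (Int × Int)) (et : Int) : Int :=
  PySem.List.minD ((points.filter (fun p => p.2 == et)).map Prod.fst) (fun x => x) 0

def pareto_front_with_et_coverage_py_alt (points : List (Int × Int)) : List (Int × Int) :=
  let ets := PySem.List.sorted (PySem.Set.ofList (points.map Prod.snd)) (fun x => x)
  ets.map (fun et => (etMinArea points et, et))

-- ===== PRECONDITION & SPEC =====
def Spec_pareto_front_with_et_coverage_py (points : List (Int × Int)) (out : List (Int × Int)) : Prop := out = pareto_front_with_et_coverage_py_alt points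
instance (points : List (Int × Int)) (out : List (Int × Int)) : Decidable (Spec_pareto_front_with_et_coverage_py points out) := by unfold Spec_pareto_front_with_et_coverage_py; infer_instance

-- ===== CLAIM (what is proved, stated in full; the proofs are below) =====
def Claim_equal_pareto_front_with_et_coverage_py : Prop := ∀ (points : List (Int × Int)), Dom_pareto_front_with_et_coverage_py points → Spec_pareto_front_with_et_coverage_py points (pareto_front_with_et_coverage_py points)

-- ===== LEMMAS AND PROOFS =====

-- the 'before' comparator of PySem.List.sorted2 with keys k1, k2
def pvBefore {α : Type} (k1 k2 : α → Int) (a b : α) : Bool :=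
  decide (k1 a < k1 b) || (!decide (k1 b < k1 a) && decide (k2 a < k2 b))

lemma pvBefore_asym {α : Type} (k1 k2 : α → Int) (a b : α)
    (h : pvBefore k1 k2 a b = true) : pvBefore k1 k2 b a = false := by
  simp [pvBefore] at *; omega

lemma pvBefore_trans_false {α : Type} (k1 k2 : α → Int) (x y z : α)
    (h1 : pvBefore k1 k2 x y = true) (h2 : pvBefore k1 k2 z y = false) :
    pvBefore k1 k2 z x = false := by
  simp [pvBefore] at *; omega

lemma pvInsertBy_pairwise {α : Type} (k1 k2 : α → Int) (x : α) (ys : List α)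
    (h : ys.Pairwise (fun a b => pvBefore k1 k2 b a = false)) :
    (PySem.List.insertBy (pvBefore k1 k2) x ys).Pairwise
      (fun a b => pvBefore k1 k2 b a = false) := by
  induction ys with
  | nil => simp [PySem.List.insertBy]
  | cons y ys ih =>
    rw [List.pairwise_cons] at h
    rw [PySem.List.insertBy.eq_2]
    by_cases hb : pvBefore k1 k2 x y = true
    · rw [if_pos hb]
      refine List.Pairwise.cons ?_ (List.Pairwise.cons h.1 h.2)
      intro z hz
      rw [List.mem_cons] at hz
      rcases hz with rfl | hz
      · exact pvBefore_asym k1 k2 x z hb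
      · exact pvBefore_trans_false k1 k2 x y z hb (h.1 z hz)
    · rw [if_neg hb]
      refine List.Pairwise.cons ?_ (ih h.2)
      intro z hz
      rw [PySem.List.insertBy_mem_iff] at hz
      rcases hz with rfl | hz
      · simpa using hb
      · exact h.1 z hz

lemma pvSorted2_pairwise {α : Type} (xs : List α) (k1 k2 : α → Int) :
    (PySem.List.sorted2 xs k1 k2).Pairwise (fun a b => pvBefore k1 k2 b a = false) := by
  show (List.foldl (fun acc x => PySem.List.insertBy (pvBefore k1 k2) x acc) [] xs).Pairwise _
  generalize hacc : ([] : List α) = acc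
  have hp : acc.Pairwise (fun a b => pvBefore k1 k2 b a = false) := by
    subst hacc; simp
  clear hacc
  induction xs generalizing acc with
  | nil => simpa using hp
  | cons x xs ih => exact ih _ (pvInsertBy_pairwise k1 k2 x acc hp)

-- two permuted lists, one weakly ordered by the comparator and the other strictly
-- increasing on the first key, are equal
lemma pvPerm_pairwise_eq {α : Type} (k1 k2 : α → Int) :
    ∀ (l₁ l₂ : List α), l₁.Perm l₂ →
      l₁.Pairwise (fun a b => pvBefore k1 k2 b a = false) →
      l₂.Pairwise (fun a b => k1 a < k1 b) → l₁ = l₂ := by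
  intro l₁
  induction l₁ with
  | nil => intro l₂ hperm _ _; simpa using hperm.nil_eq
  | cons h₁ t₁ ih =>
    intro l₂ hperm hp₁ hp₂
    cases l₂ with
    | nil => exact absurd hperm.symm.nil_eq (by simp)
    | cons h₂ t₂ =>
      rw [List.pairwise_cons] at hp₁ hp₂
      by_cases heq : h₁ = h₂
      · subst heq
        have := ih t₂ (hperm.cons_inv) hp₁.2 hp₂.2
        rw [this]
      · exfalso
        have hmem₁ : h₂ ∈ t₁ := by
          have : h₂ ∈ h₁ :: t₁ := hperm.mem_iff.mpr (by simp)
          rcases List.mem_cons.mp this with h | h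
          · exact absurd h.symm heq
          · exact h
        have hmem₂ : h₁ ∈ t₂ := by
          have : h₁ ∈ h₂ :: t₂ := hperm.mem_iff.mp (by simp)
          rcases List.mem_cons.mp this with h | h
          · exact absurd h heq
          · exact h
        have h1 := hp₁.1 h₂ hmem₁
        have h2 := hp₂.1 h₁ hmem₂
        simp [pvBefore] at h1
        omega

-- any strictly k1-increasing rearrangement of xs is sorted2(xs, k1, k2)
lemma pvSorted2_eq {α : Type} (xs ys : List α) (k1 k2 : α → Int) (hperm : ys.Perm xs)
    (hpw : ys.Pairwise (fun a b => k1 a < k1 b)) :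
    PySem.List.sorted2 xs k1 k2 = ys := by
  have hs : (PySem.List.sorted2 xs k1 k2).Perm ys :=
    (PySem.List.sorted2_perm xs k1 k2 false).trans hperm.symm
  exact pvPerm_pairwise_eq k1 k2 _ ys hs (pvSorted2_pairwise xs k1 k2) hpw

-- ---- facts about etMinArea ----

lemma pvMin?_append_singleton (l : List Int) (a : Int) :
    PySem.List.min? (l ++ [a]) (fun x => x) =
      some (match PySem.List.min? l (fun x => x) with
            | none => a
            | some m => min a m) := by
  simp only [PySem.List.min?, List.foldl_append, List.foldl_cons, List.foldl_nil]
  cases h : List.foldl _ (none : Option Int) l with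
  | none => simp
  | some m =>
    simp only []
    by_cases hlt : a < m
    · rw [if_pos (by simpa using hlt)]
      simp [le_of_lt hlt]
    · rw [if_neg (by simpa using hlt)]
      simp [min_def]; omega

lemma etMinArea_append_ne (pre : List (Int × Int)) (x : Int × Int) (et : Int) (h : et ≠ x.2) :
    etMinArea (pre ++ [x]) et = etMinArea pre et := by
  simp [etMinArea, List.filter_append, Ne.symm h]

lemma mem_map_snd_iff_filter_ne_nil (pre : List (Int × Int)) (et : Int) :
    et ∈ pre.map Prod.snd ↔ pre.filter (fun p => p.2 == et) ≠ [] := by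
  rw [List.mem_map]
  constructor
  · rintro ⟨p, hp, rfl⟩ hnil
    have : p ∈ pre.filter (fun q => q.2 == p.2) := List.mem_filter.mpr ⟨hp, by simp⟩
    rw [hnil] at this; simp at this
  · intro hne
    rcases List.exists_mem_of_ne_nil _ hne with ⟨p, hp⟩
    rw [List.mem_filter] at hp
    exact ⟨p, hp.1, by simpa using hp.2⟩

lemma etMinArea_append_self_not_mem (pre : List (Int × Int)) (x : Int × Int)
    (h : x.2 ∉ pre.map Prod.snd) : etMinArea (pre ++ [x]) x.2 = x.1 := by
  have hnil : pre.filter (fun p => p.2 == x.2) = [] := by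
    by_contra hne
    exact h ((mem_map_snd_iff_filter_ne_nil pre x.2).mpr hne)
  simp [etMinArea, List.filter_append, hnil, PySem.List.minD, PySem.List.min?]

lemma etMinArea_append_self_mem (pre : List (Int × Int)) (x : Int × Int)
    (h : x.2 ∈ pre.map Prod.snd) :
    etMinArea (pre ++ [x]) x.2 = min x.1 (etMinArea pre x.2) := by
  have hne := (mem_map_snd_iff_filter_ne_nil pre x.2).mp h
  simp only [etMinArea, List.filter_append, List.filter_cons, List.filter_nil, beq_self_eq_true,
    if_pos, List.map_append, List.map_cons, List.map_nil, PySem.List.minD]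
  rw [pvMin?_append_singleton]
  cases hm : PySem.List.min? ((pre.filter (fun p => p.2 == x.2)).map Prod.fst) (fun x => x) with
  | none =>
    rw [PySem.List.min?_eq_none_iff] at hm
    rw [List.map_eq_nil_iff] at hm
    exact absurd hm hne
  | some m => simp

lemma pvMin?_id_eq_min? (l : List Int) : PySem.List.min? l (fun x => x) = l.min? := by
  cases l with
  | nil => rfl
  | cons x t => rw [PySem.List.min?_id_cons]; rfl

lemma pvMin?_id_perm (l₁ l₂ : List Int) (h : l₁.Perm l₂) :
    PySem.List.min? l₁ (fun x => x) = PySem.List.min? l₂ (fun x => x) := by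
  rw [pvMin?_id_eq_min?, pvMin?_id_eq_min?]
  cases hm : l₂.min? with
  | none =>
    rw [List.min?_eq_none_iff] at hm
    subst hm
    rw [List.min?_eq_none_iff, h.symm.nil_eq]
  | some m =>
    rw [List.min?_eq_some_iff] at hm ⊢
    exact ⟨h.mem_iff.mpr hm.1, fun b hb => hm.2 b (h.mem_iff.mp hb)⟩

lemma etMinArea_perm (l₁ l₂ : List (Int × Int)) (h : l₁.Perm l₂) (et : Int) :
    etMinArea l₁ et = etMinArea l₂ et := by
  simp only [etMinArea, PySem.List.minD]
  rw [pvMin?_id_perm _ _ ((h.filter _).map Prod.fst)]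

lemma paretoStep_fresh (st : List (Int × Int) × PySem.Dict Int Int) (x : Int × Int)
    (h : st.2.contains x.2 = false) :
    paretoStep st x = (st.1 ++ [x], st.2.insert x.2 x.1) := by
  simp [paretoStep, h]

lemma paretoStep_update (st : List (Int × Int) × PySem.Dict Int Int) (x : Int × Int)
    (h : st.2.contains x.2 = true) (h2 : x.1 < st.2.getD x.2 0) :
    paretoStep st x = ((st.1.filter (fun p => decide (p.2 ≠ x.2))) ++ [x], st.2.insert x.2 x.1) := by
  simp [paretoStep, h, h2]

lemma paretoStep_keep (st : List (Int × Int) × PySem.Dict Int Int) (x : Int × Int)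
    (h : st.2.contains x.2 = true) (h2 : ¬ x.1 < st.2.getD x.2 0) :
    paretoStep st x = (st.1, st.2) := by
  simp [paretoStep, h, h2]

-- ---- the loop invariant of A's fold ----

def pvInv (pre : List (Int × Int)) (st : List (Int × Int) × PySem.Dict Int Int) : Prop :=
  (∀ et : Int, st.2.get? et = if et ∈ pre.map Prod.snd then some (etMinArea pre et) else none) ∧
  st.1.Perm ((PySem.Set.ofList (pre.map Prod.snd)).map (fun et => (etMinArea pre et, et)))

lemma pvInv_step (pre : List (Int × Int)) (st : List (Int × Int) × PySem.Dict Int Int)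
    (x : Int × Int) (h : pvInv pre st) : pvInv (pre ++ [x]) (paretoStep st x) := by
  obtain ⟨hd, hp⟩ := h
  have hmapsnd : (pre ++ [x]).map Prod.snd = pre.map Prod.snd ++ [x.2] := by simp
  have hKnd : (PySem.Set.ofList (pre.map Prod.snd)).Nodup := PySem.Set.nodup_ofList _
  by_cases hmem : x.2 ∈ pre.map Prod.snd
  · -- key present in the dict
    have hcon : st.2.contains x.2 = true := by
      rw [PySem.Dict.contains_eq_isSome_get?, hd x.2, if_pos hmem]; rfl
    have hgetD : st.2.getD x.2 0 = etMinArea pre x.2 := by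
      rw [PySem.Dict.getD_eq_get?_getD, hd x.2, if_pos hmem]; rfl
    have hK' : PySem.Set.ofList ((pre ++ [x]).map Prod.snd) =
        PySem.Set.ofList (pre.map Prod.snd) := by
      rw [hmapsnd, PySem.Set.ofList_append_singleton,
        PySem.Set.add_of_mem (by rw [PySem.Set.mem_ofList]; exact hmem)]
    by_cases hlt : x.1 < st.2.getD x.2 0
    · -- update branch
      have hminx : etMinArea (pre ++ [x]) x.2 = x.1 := by
        rw [etMinArea_append_self_mem pre x hmem, min_eq_left]
        rw [hgetD] at hlt; exact le_of_lt hlt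
      constructor
      · intro et
        rw [paretoStep_update st x hcon hlt]
        rw [PySem.Dict.get?_insert]
        by_cases het : et = x.2
        · subst het
          rw [if_pos rfl, if_pos (by rw [hmapsnd]; simp), hminx]
        · rw [if_neg het, hd et, hmapsnd]
          by_cases hetm : et ∈ pre.map Prod.snd
          · rw [if_pos hetm, if_pos (by simp [hetm]), etMinArea_append_ne pre x et het]
          · rw [if_neg hetm, if_neg (by simp [hetm, het])]
      · rw [paretoStep_update st x hcon hlt]
        rw [hK']
        have hx2K : x.2 ∈ PySem.Set.ofList (pre.map Prod.snd) := by
          rw [PySem.Set.mem_ofList]; exact hmem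
        -- K ~ K.filter (· ≠ x.2) ++ [x.2]
        have hKperm : (PySem.Set.ofList (pre.map Prod.snd)).Perm
            ((PySem.Set.ofList (pre.map Prod.snd)).filter (fun et => decide (et ≠ x.2)) ++ [x.2]) := by
          have h1 := List.perm_cons_erase hx2K
          rw [hKnd.erase_eq_filter] at h1
          have hfe : (fun y => y != x.2) = (fun et : Int => decide (et ≠ x.2)) := by
            funext y; by_cases hy : y = x.2 <;> simp [hy]
          rw [hfe] at h1
          exact h1.trans (List.perm_append_singleton _ _).symm
        refine List.Perm.trans ?_ ((hKperm.map _).symm)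
        rw [List.map_append]
        refine List.Perm.append ?_ ?_
        · -- filtered parts agree
          have h1 : (st.1.filter (fun p => decide (p.2 ≠ x.2))).Perm
              ((((PySem.Set.ofList (pre.map Prod.snd)).map (fun et => (etMinArea pre et, et))).filter
                (fun p => decide (p.2 ≠ x.2)))) := hp.filter _
          rw [List.filter_map] at h1
          refine h1.trans (List.Perm.of_eq (List.map_congr_left ?_))
          intro et het
          rw [List.mem_filter] at het
          have hne : et ≠ x.2 := by simpa using het.2
          rw [etMinArea_append_ne pre x et hne]
        · simp only [List.map_cons, List.map_nil, hminx]
          exact List.Perm.of_eq (by simp)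
      
    · -- no-update branch
      have hmin_eq : etMinArea (pre ++ [x]) x.2 = etMinArea pre x.2 := by
        rw [etMinArea_append_self_mem pre x hmem, min_eq_right]
        rw [hgetD] at hlt; omega
      constructor
      · intro et
        rw [paretoStep_keep st x hcon hlt]
        rw [hd et, hmapsnd]
        by_cases het : et = x.2
        · subst het
          rw [if_pos hmem, if_pos (by simp), hmin_eq]
        · by_cases hetm : et ∈ pre.map Prod.snd
          · rw [if_pos hetm, if_pos (by simp [hetm]), etMinArea_append_ne pre x et het]
          · rw [if_neg hetm, if_neg (by simp [hetm, het])]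
      · rw [paretoStep_keep st x hcon hlt]
        rw [hK']
        refine hp.trans (List.Perm.of_eq (List.map_congr_left ?_))
        intro et het
        by_cases heq : et = x.2
        · subst heq; rw [hmin_eq]
        · rw [etMinArea_append_ne pre x et heq]
  · -- fresh key
    have hcon : st.2.contains x.2 = false := by
      rw [PySem.Dict.contains_eq_isSome_get?, hd x.2, if_neg hmem]; rfl
    have hminx : etMinArea (pre ++ [x]) x.2 = x.1 := etMinArea_append_self_not_mem pre x hmem
    constructor
    · intro et
      rw [paretoStep_fresh st x hcon]
      rw [PySem.Dict.get?_insert]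
      by_cases het : et = x.2
      · subst het
        rw [if_pos rfl, if_pos (by rw [hmapsnd]; simp), hminx]
      · rw [if_neg het, hd et, hmapsnd]
        by_cases hetm : et ∈ pre.map Prod.snd
        · rw [if_pos hetm, if_pos (by simp [hetm]), etMinArea_append_ne pre x et het]
        · rw [if_neg hetm, if_neg (by simp [hetm, het])]
    · rw [paretoStep_fresh st x hcon]
      have hK' : PySem.Set.ofList ((pre ++ [x]).map Prod.snd) =
          PySem.Set.ofList (pre.map Prod.snd) ++ [x.2] := by
        rw [hmapsnd, PySem.Set.ofList_append_singleton,
          PySem.Set.add_of_not_mem (by rw [PySem.Set.mem_ofList]; exact hmem)]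
      rw [hK', List.map_append]
      refine List.Perm.append ?_ ?_
      · refine hp.trans (List.Perm.of_eq (List.map_congr_left ?_))
        intro et het
        have : et ≠ x.2 := by
          intro heq; subst heq
          exact hmem (by rwa [← PySem.Set.mem_ofList])
        rw [etMinArea_append_ne pre x et this]
      · simp only [List.map_cons, List.map_nil, hminx]
        exact List.Perm.of_eq (by simp)

lemma pvInv_foldl (l : List (Int × Int)) :
    ∀ (pre : List (Int × Int)) (st : List (Int × Int) × PySem.Dict Int Int), pvInv pre st →
      pvInv (pre ++ l) (l.foldl paretoStep st) := by
  induction l with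
  | nil => intro pre st h; simpa using h
  | cons x l ih =>
    intro pre st h
    have := ih (pre ++ [x]) (paretoStep st x) (pvInv_step pre st x h)
    simpa [List.append_assoc] using this

-- ===== VERDICT (by name: the statement is the Claim_ definition above) =====
theorem pareto_front_with_et_coverage_py_spec : Claim_equal_pareto_front_with_et_coverage_py := by
  unfold Claim_equal_pareto_front_with_et_coverage_py
  intro points _
  unfold Spec_pareto_front_with_et_coverage_py
  unfold pareto_front_with_et_coverage_py pareto_front_with_et_coverage_py_alt
  simp only []
  set s := PySem.List.sorted2 points (fun x => x.2) (fun x => x.1) with hs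
  have hsp : s.Perm points := PySem.List.sorted2_perm points _ _ false
  have hinv : pvInv s (s.foldl paretoStep ([], PySem.Dict.empty)) := by
    have h0 : pvInv [] (([] : List (Int × Int)), (PySem.Dict.empty : PySem.Dict Int Int)) := by
      constructor
      · intro et; simp [PySem.Dict.get?_empty]
      · simp [PySem.Set.ofList]
    simpa using pvInv_foldl s [] _ h0
  have hfs : ∀ et, etMinArea s et = etMinArea points et :=
    fun et => etMinArea_perm s points hsp et
  have hKperm : (PySem.Set.ofList (s.map Prod.snd)).Perm
      (PySem.Set.ofList (points.map Prod.snd)) := by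
    rw [List.perm_ext_iff_of_nodup (PySem.Set.nodup_ofList _) (PySem.Set.nodup_ofList _)]
    intro a
    rw [PySem.Set.mem_ofList, PySem.Set.mem_ofList, (hsp.map Prod.snd).mem_iff]
  set K' := PySem.Set.ofList (points.map Prod.snd) with hK'
  refine pvSorted2_eq _ _ _ _ ?_ ?_
  · -- B's output is a permutation of the loop's pareto list
    refine List.Perm.trans ?_ hinv.2.symm
    have h1 : (PySem.List.sorted K' (fun x => x)).Perm K' := PySem.List.sorted_perm _ _ _
    refine (h1.map _).trans ?_
    refine List.Perm.trans ?_ ((hKperm.map (fun et => (etMinArea s et, et))).symm)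
    exact List.Perm.of_eq (List.map_congr_left (fun et _ => by rw [hfs et]))
  · -- B's output is strictly increasing on the ET component
    rw [List.pairwise_map]
    exact PySem.List.sorted_ofList_pairwise_lt (points.map Prod.snd)
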